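-- pv_equiv track=rewrite | github.com/nherbaut/netsoft-2021-paper | check-logs/log_checker_lib.py | get_mgt_rules_for_timestamp
-- ===== SOURCE A (Python) =====
-- def get_mgt_rules_for_timestamp(k, mgt_rules):
--     command_timestamps = sorted(mgt_rules.keys())
--     prev = command_timestamps[0]
--     for i in sorted(mgt_rules.keys()):
--         if i > k:
--             break
--         else:
--             prev = i
--     return mgt_rules[prev]
-- ===== SOURCE B (Python) =====
-- def get_mgt_rules_for_timestamp(k, mgt_rules):
--     best = None   # entry with the largest key <= k
--     mn = None     # entry with the smallest key
--     for key, val in mgt_rules.items():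
--         if mn is None or key < mn[0]:
--             mn = (key, val)
--         if key <= k and (best is None or best[0] < key):
--             best = (key, val)
--     chosen = best if best is not None else mn
--     return chosen[1]
-- ===== Notes on version B (the rewrite author's own statement) =====
-- stated objective: alternative
-- what changed: A sorts the key set and scans the sorted list with a break to find the largest timestamp <= k (falling back to the smallest); B makes one linear pass over the dict items tracking the entry with the largest key <= k and the entry with the smallest key, so the sort and the final dict lookup disappear.
-- outside the precondition, e.g. on get_mgt_rules_for_timestamp(3, {}): A raises IndexError, B raises TypeError
import Mathlib
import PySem

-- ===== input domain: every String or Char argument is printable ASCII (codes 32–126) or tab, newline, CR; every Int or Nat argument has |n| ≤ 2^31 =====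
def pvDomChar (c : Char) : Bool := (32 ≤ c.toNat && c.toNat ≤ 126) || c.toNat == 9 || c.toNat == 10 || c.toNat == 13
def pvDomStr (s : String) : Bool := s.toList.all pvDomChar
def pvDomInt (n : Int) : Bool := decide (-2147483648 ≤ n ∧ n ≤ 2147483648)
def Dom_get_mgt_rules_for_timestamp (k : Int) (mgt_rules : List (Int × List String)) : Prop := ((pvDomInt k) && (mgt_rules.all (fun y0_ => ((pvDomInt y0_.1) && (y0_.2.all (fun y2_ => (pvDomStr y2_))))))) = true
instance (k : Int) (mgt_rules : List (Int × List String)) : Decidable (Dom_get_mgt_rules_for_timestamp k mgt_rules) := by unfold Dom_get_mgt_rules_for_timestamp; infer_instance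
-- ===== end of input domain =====

-- B replaces A's sort-then-scan of the key set by one linear pass over the dict items that
-- tracks the entry with the largest key ≤ k and the entry with the smallest key (objective: alternative; the sort and the final lookup disappear).

-- ===== PORT A =====
-- the 'for i in sorted(...): if i > k: break else: prev = i' loop
def pvALoop (k : Int) (prev : Int) : List Int → Int
  | [] => prev
  | i :: rest => if k < i then prev else pvALoop k i rest

def get_mgt_rules_for_timestamp (k : Int) (mgt_rules : List (Int × List String)) : List String :=
  let d := PySem.Dict.ofList mgt_rules
  let command_timestamps := PySem.List.sorted d.keys (fun x => x) false
  match command_timestamps with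
  | [] => []  -- Python raises IndexError on 'command_timestamps[0]' here; excluded by Pre_
  | p :: _ =>
    let prev := pvALoop k p command_timestamps
    d.getD prev []  -- prev is always a key of d, so the default is never used

-- ===== PORT B =====
-- 'if key <= k and (best is None or best[0] < key): best = (key, val)'
def pvBestStep (k : Int) (st : Option (Int × List String)) (p : Int × List String) : Option (Int × List String) :=
  if p.1 ≤ k then
    match st with
    | none => some p
    | some q => if q.1 < p.1 then some p else some q
  else st

-- 'if mn is None or key < mn[0]: mn = (key, val)'
def pvMinStep (st : Option (Int × List String)) (p : Int × List String) : Option (Int × List String) :=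
  match st with
  | none => some p
  | some q => if p.1 < q.1 then some p else some q

def get_mgt_rules_for_timestamp_alt (k : Int) (mgt_rules : List (Int × List String)) : List String :=
  let r := (PySem.Dict.ofList mgt_rules).items.foldl
      (fun st p => (pvBestStep k st.1 p, pvMinStep st.2 p)) (none, none)
  match r.1 with
  | some p => p.2
  | none =>
    match r.2 with
    | some p => p.2
    | none => []  -- empty dict: Python B raises there too; excluded by Pre_

-- ===== PRECONDITION & SPEC =====
-- A raises IndexError on the empty dict (and B a TypeError); Pre_ excludes exactly the empty dict.
def Pre_get_mgt_rules_for_timestamp (_k : Int) (mgt_rules : List (Int × List String)) : Prop := mgt_rules ≠ []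
instance (k : Int) (mgt_rules : List (Int × List String)) : Decidable (Pre_get_mgt_rules_for_timestamp k mgt_rules) := by unfold Pre_get_mgt_rules_for_timestamp; infer_instance

def pvWitness_get_mgt_rules_for_timestamp : Int × (List (Int × List String)) := (3, [(1, ["a"]), (5, ["b"])])

def Spec_get_mgt_rules_for_timestamp (k : Int) (mgt_rules : List (Int × List String)) (out : List String) : Prop := out = get_mgt_rules_for_timestamp_alt k mgt_rules
instance (k : Int) (mgt_rules : List (Int × List String)) (out : List String) : Decidable (Spec_get_mgt_rules_for_timestamp k mgt_rules out) := by unfold Spec_get_mgt_rules_for_timestamp; infer_instance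

-- ===== CLAIM (what is proved, stated in full; the proofs are below) =====
def Claim_equal_get_mgt_rules_for_timestamp : Prop := ∀ (k : Int) (mgt_rules : List (Int × List String)), Dom_get_mgt_rules_for_timestamp k mgt_rules → Pre_get_mgt_rules_for_timestamp k mgt_rules → Spec_get_mgt_rules_for_timestamp k mgt_rules (get_mgt_rules_for_timestamp k mgt_rules)

-- ===== LEMMAS AND PROOFS =====

-- A's loop returns the last element ≤ k scanned before the break, i.e. the last of the takeWhile prefix.
theorem pvALoop_eq_takeWhile (k : Int) (ts : List Int) (prev : Int) :
    pvALoop k prev ts = ((ts.takeWhile (fun i => decide (i ≤ k))).getLast?).getD prev := by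
  induction ts generalizing prev with
  | nil => simp [pvALoop]
  | cons i rest ih =>
    by_cases h : k < i
    · simp [pvALoop, h, show ¬ (i ≤ k) by omega]
    · simp [pvALoop, h, show i ≤ k by omega, ih, List.getLast?_cons]

-- on a ≤-sorted list, takeWhile (≤ k) keeps exactly the elements ≤ k
theorem pvTakeWhile_eq_filter (k : Int) (ts : List Int) (h : ts.Pairwise (· ≤ ·)) :
    ts.takeWhile (fun i => decide (i ≤ k)) = ts.filter (fun i => decide (i ≤ k)) := by
  induction ts with
  | nil => rfl
  | cons a t ih =>
    rcases List.pairwise_cons.mp h with ⟨ha, ht⟩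
    by_cases hak : a ≤ k
    · simp [hak, ih ht]
    · have ht0 : t.filter (fun i => decide (i ≤ k)) = [] := by
        apply List.filter_eq_nil_iff.mpr
        intro x hx
        have := ha x hx
        simp only [decide_eq_true_eq]
        omega
      simp [hak, ht0]

-- the last element of a ≤-sorted nonempty list is a member bounding all its elements
theorem pvGetLast_max (l : List Int) (h : l.Pairwise (· ≤ ·)) (hne : l ≠ []) :
    ∃ m, l.getLast? = some m ∧ m ∈ l ∧ ∀ x ∈ l, x ≤ m := by
  induction l with
  | nil => exact absurd rfl hne
  | cons a t ih =>
    rcases List.pairwise_cons.mp h with ⟨ha, ht⟩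
    cases t with
    | nil => exact ⟨a, by simp, by simp, by simp⟩
    | cons b u =>
      rcases ih ht (by simp) with ⟨m, hlast, hmem, hall⟩
      refine ⟨m, by rwa [List.getLast?_cons_cons], by simp [hmem], ?_⟩
      intro x hx
      rcases List.mem_cons.mp hx with rfl | hx'
      · exact le_trans (ha m hmem) (le_refl m)
      · exact hall x hx'

-- min-fold: folding pvMinStep from some q0 yields an element of q0::l with minimal key
theorem pvMinFold_spec (l : List (Int × List String)) (q0 : Int × List String) :
    ∃ q, l.foldl pvMinStep (some q0) = some q ∧ (q = q0 ∨ q ∈ l) ∧ q.1 ≤ q0.1 ∧ ∀ p ∈ l, q.1 ≤ p.1 := by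
  induction l generalizing q0 with
  | nil => exact ⟨q0, rfl, Or.inl rfl, le_refl _, by simp⟩
  | cons p t ih =>
    by_cases h : p.1 < q0.1
    · rcases ih p with ⟨q, hq, hmem, hle, hall⟩
      refine ⟨q, by simpa [pvMinStep, h] using hq, ?_, by omega, ?_⟩
      · rcases hmem with rfl | hm
        · exact Or.inr (by simp)
        · exact Or.inr (by simp [hm])
      · intro r hr
        rcases List.mem_cons.mp hr with rfl | hm
        · omega
        · exact hall r hm
    · rcases ih q0 with ⟨q, hq, hmem, hle, hall⟩
      refine ⟨q, by simpa [pvMinStep, h] using hq, ?_, hle, ?_⟩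
      · rcases hmem with rfl | hm
        · exact Or.inl rfl
        · exact Or.inr (by simp [hm])
      · intro r hr
        rcases List.mem_cons.mp hr with rfl | hm
        · omega
        · exact hall r hm

-- best-fold from none stays none when no key is ≤ k
theorem pvBestFold_none (k : Int) (l : List (Int × List String)) (h : ∀ p ∈ l, k < p.1) :
    l.foldl (pvBestStep k) none = none := by
  induction l with
  | nil => rfl
  | cons p t ih =>
    have hp : ¬ p.1 ≤ k := by have := h p (by simp); omega
    have hstep : pvBestStep k none p = none := by simp [pvBestStep, hp]
    rw [List.foldl_cons, hstep]
    exact ih (fun r hr => h r (by simp [hr]))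

-- best-fold from a seed ≤ k yields an element with the largest key ≤ k
theorem pvBestFold_some (k : Int) (l : List (Int × List String)) (q0 : Int × List String) (h0 : q0.1 ≤ k) :
    ∃ q, l.foldl (pvBestStep k) (some q0) = some q ∧ (q = q0 ∨ q ∈ l) ∧ q.1 ≤ k ∧ q0.1 ≤ q.1 ∧ ∀ p ∈ l, p.1 ≤ k → p.1 ≤ q.1 := by
  induction l generalizing q0 with
  | nil => exact ⟨q0, rfl, Or.inl rfl, h0, le_refl _, by simp⟩
  | cons p t ih =>
    by_cases hpk : p.1 ≤ k
    · by_cases h : q0.1 < p.1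
      · rcases ih p hpk with ⟨q, hq, hmem, hqk, hge, hall⟩
        refine ⟨q, by simpa [pvBestStep, hpk, h] using hq, ?_, hqk, by omega, ?_⟩
        · rcases hmem with rfl | hm
          · exact Or.inr (by simp)
          · exact Or.inr (by simp [hm])
        · intro r hr hrk
          rcases List.mem_cons.mp hr with rfl | hm
          · omega
          · exact hall r hm hrk
      · rcases ih q0 h0 with ⟨q, hq, hmem, hqk, hge, hall⟩
        refine ⟨q, by simpa [pvBestStep, hpk, h] using hq, ?_, hqk, hge, ?_⟩
        · rcases hmem with rfl | hm
          · exact Or.inl rfl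
          · exact Or.inr (by simp [hm])
        · intro r hr hrk
          rcases List.mem_cons.mp hr with rfl | hm
          · omega
          · exact hall r hm hrk
    · rcases ih q0 h0 with ⟨q, hq, hmem, hqk, hge, hall⟩
      refine ⟨q, by simpa [pvBestStep, hpk] using hq, ?_, hqk, hge, ?_⟩
      · rcases hmem with rfl | hm
        · exact Or.inl rfl
        · exact Or.inr (by simp [hm])
      · intro r hr hrk
        rcases List.mem_cons.mp hr with rfl | hm
        · omega
        · exact hall r hm hrk

-- best-fold from none finds an element with the largest key ≤ k when one exists
theorem pvBestFold_start (k : Int) (l : List (Int × List String)) (h : ∃ p ∈ l, p.1 ≤ k) :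
    ∃ q, l.foldl (pvBestStep k) none = some q ∧ q ∈ l ∧ q.1 ≤ k ∧ ∀ p ∈ l, p.1 ≤ k → p.1 ≤ q.1 := by
  induction l with
  | nil => rcases h with ⟨p, hp, _⟩; cases hp
  | cons p t ih =>
    by_cases hpk : p.1 ≤ k
    · rcases pvBestFold_some k t p hpk with ⟨q, hq, hmem, hqk, hge, hall⟩
      refine ⟨q, by simpa [pvBestStep, hpk] using hq, ?_, hqk, ?_⟩
      · rcases hmem with rfl | hm
        · simp
        · simp [hm]
      · intro r hr hrk
        rcases List.mem_cons.mp hr with rfl | hm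
        · exact hge
        · exact hall r hm hrk
    · rcases h with ⟨r, hr, hrk⟩
      rcases List.mem_cons.mp hr with rfl | hm
      · omega
      · rcases ih ⟨r, hm, hrk⟩ with ⟨q, hq, hmem, hqk, hall⟩
        refine ⟨q, by simpa [pvBestStep, hpk] using hq, by simp [hmem], hqk, ?_⟩
        intro s hs hsk
        rcases List.mem_cons.mp hs with rfl | hm'
        · omega
        · exact hall s hm' hsk

-- keys of the dict built from mgt_rules, as a map over its items
theorem pvKeys_eq (mgt_rules : List (Int × List String)) :
    (PySem.Dict.ofList mgt_rules).keys = (PySem.Dict.ofList mgt_rules).items.map (·.1) := rfl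

theorem pvKeys_ne_nil (mgt_rules : List (Int × List String)) (h : mgt_rules ≠ []) :
    (PySem.Dict.ofList mgt_rules).keys ≠ [] := by
  have hk : (PySem.Dict.ofList mgt_rules).keys
      = PySem.Set.update (PySem.Dict.empty (κ := Int) (ν := List String)).keys (mgt_rules.map (·.1)) :=
    PySem.Dict.keys_foldl_insert_key mgt_rules (·.1) (fun _ p => p.2) _
  cases mgt_rules with
  | nil => exact absurd rfl h
  | cons m t =>
    rw [hk, PySem.Dict.keys_empty, PySem.Set.update_nil_left]
    intro hnil
    have : m.1 ∈ PySem.Set.ofList ((m :: t).map (·.1)) := (PySem.Set.mem_ofList ..).mpr (by simp)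
    rw [hnil] at this
    cases this

-- the heart of the equivalence
theorem pvMain (k : Int) (mgt_rules : List (Int × List String)) (hpre : mgt_rules ≠ []) :
    get_mgt_rules_for_timestamp k mgt_rules = get_mgt_rules_for_timestamp_alt k mgt_rules := by
  set d := PySem.Dict.ofList mgt_rules with hd
  have hnd : d.keys.Nodup := PySem.Dict.nodup_keys_ofList mgt_rules
  have hkeys : d.keys = d.items.map (·.1) := pvKeys_eq mgt_rules
  have hkne : d.keys ≠ [] := pvKeys_ne_nil mgt_rules hpre
  -- the sorted timestamp list
  set ts := PySem.List.sorted d.keys (fun x => x) false with hts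
  have htsne : ts ≠ [] := fun hnil => hkne ((PySem.List.sorted_eq_nil_iff ..).mp hnil)
  obtain ⟨t0, tr, htseq⟩ : ∃ t0 tr, ts = t0 :: tr := by
    cases h : ts with
    | nil => exact absurd h htsne
    | cons a b => exact ⟨a, b, rfl⟩
  have hperm : ts.Perm d.keys := PySem.List.sorted_perm d.keys (fun x => x) false
  have hpair : ts.Pairwise (· ≤ ·) := by
    simpa using PySem.List.sorted_pairwise d.keys (fun x => x)
  have hhead : ∀ y ∈ d.keys, t0 ≤ y :=
    PySem.List.key_head_sorted_le d.keys (fun x => x) (htseq ▸ hts.symm)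
  -- evaluate port A to 'd.getD (pvALoop k t0 ts) []'
  have hA : get_mgt_rules_for_timestamp k mgt_rules = d.getD (pvALoop k t0 ts) [] := by
    simp only [get_mgt_rules_for_timestamp, ← hd, ← hts]
    rw [htseq]
  -- evaluate port B via the product fold
  have hB : get_mgt_rules_for_timestamp_alt k mgt_rules =
      (match d.items.foldl (pvBestStep k) none with
       | some p => p.2
       | none =>
         match d.items.foldl pvMinStep none with
         | some p => p.2
         | none => []) := by
    simp only [get_mgt_rules_for_timestamp_alt, ← hd]
    rw [PySem.List.foldl_prod_mk (pvBestStep k) pvMinStep d.items none none]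
  rw [hA, hB, pvALoop_eq_takeWhile]
  have hmemfilter : ∀ x : Int, x ∈ ts.filter (fun i => decide (i ≤ k)) ↔ x ∈ d.keys ∧ x ≤ k := by
    intro x
    rw [List.mem_filter]
    constructor
    · rintro ⟨hx, hxk⟩; exact ⟨hperm.mem_iff.mp hx, by simpa using hxk⟩
    · rintro ⟨hx, hxk⟩; exact ⟨hperm.mem_iff.mpr hx, by simpa using hxk⟩
  by_cases hex : ∃ p ∈ d.items, p.1 ≤ k
  · -- some timestamp is ≤ k: both sides pick the largest key ≤ k
    rcases pvBestFold_start k d.items hex with ⟨q, hq, hqmem, hqk, hqall⟩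
    rw [hq]
    have hqkey : q.1 ∈ d.keys := by rw [hkeys]; exact List.mem_map.mpr ⟨q, hqmem, rfl⟩
    have hfilpair : (ts.filter (fun i => decide (i ≤ k))).Pairwise (· ≤ ·) := hpair.filter _
    have hfilne : ts.filter (fun i => decide (i ≤ k)) ≠ [] := by
      intro hnil
      have : q.1 ∈ ts.filter (fun i => decide (i ≤ k)) := (hmemfilter q.1).mpr ⟨hqkey, hqk⟩
      rw [hnil] at this; cases this
    rcases pvGetLast_max _ hfilpair hfilne with ⟨m, hmlast, hmmem, hmall⟩
    rw [pvTakeWhile_eq_filter k ts hpair, hmlast]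
    have hmq : m = q.1 := by
      have h1 : q.1 ≤ m := hmall q.1 ((hmemfilter q.1).mpr ⟨hqkey, hqk⟩)
      have hmk : m ∈ d.keys ∧ m ≤ k := (hmemfilter m).mp hmmem
      obtain ⟨pm, hpm, hpm1⟩ := List.mem_map.mp (hkeys ▸ hmk.1)
      have h2 : m ≤ q.1 := hpm1 ▸ hqall pm hpm (hpm1.symm ▸ hmk.2)
      omega
    have : d.getD q.1 [] = q.2 :=
      PySem.Dict.getD_of_mem_items d (by simpa using hqmem) hnd []
    simp [hmq, this]
  · -- every timestamp is > k: both sides pick the smallest key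
    rw [not_exists] at hex
    replace hex : ∀ p ∈ d.items, k < p.1 := fun p hp => by
      by_contra hlt
      exact hex p ⟨hp, by omega⟩
    have hnone : d.items.foldl (pvBestStep k) none = none := pvBestFold_none k d.items hex
    rw [hnone]
    obtain ⟨p0, lr, hleq⟩ : ∃ p0 lr, d.items = p0 :: lr := by
      cases h : d.items with
      | nil => rw [hkeys, h] at hkne; exact absurd rfl hkne
      | cons a b => exact ⟨a, b, rfl⟩
    have hmin0 : d.items.foldl pvMinStep none = lr.foldl pvMinStep (some p0) := by
      rw [hleq]; rfl
    rcases pvMinFold_spec lr p0 with ⟨q, hq, hqmem0, hqle, hqall0⟩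
    have hqmem : q ∈ d.items := by
      rw [hleq]; rcases hqmem0 with rfl | hm
      · simp
      · simp [hm]
    have hqall : ∀ p ∈ d.items, q.1 ≤ p.1 := by
      intro p hp
      rw [hleq] at hp
      rcases List.mem_cons.mp hp with rfl | hm
      · exact hqle
      · exact hqall0 p hm
    rw [hmin0, hq]
    -- the takeWhile prefix is empty, so A's key is t0
    have ht0k : k < t0 := by
      have ht0 : t0 ∈ d.keys := hperm.mem_iff.mp (htseq ▸ List.mem_cons_self)
      obtain ⟨pt, hpt, hpt1⟩ := List.mem_map.mp (hkeys ▸ ht0)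
      exact hpt1 ▸ hex pt hpt
    have htw : ts.takeWhile (fun i => decide (i ≤ k)) = [] := by
      rw [htseq, List.takeWhile_cons, if_neg (by simp; omega)]
    rw [htw]
    have ht0q : t0 = q.1 := by
      have h1 : t0 ≤ q.1 := hhead q.1 (by rw [hkeys]; exact List.mem_map.mpr ⟨q, hqmem, rfl⟩)
      have ht0 : t0 ∈ d.keys := hperm.mem_iff.mp (htseq ▸ List.mem_cons_self)
      obtain ⟨pt, hpt, hpt1⟩ := List.mem_map.mp (hkeys ▸ ht0)
      have h2 : q.1 ≤ t0 := hpt1 ▸ hqall pt hpt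
      omega
    have : d.getD q.1 [] = q.2 :=
      PySem.Dict.getD_of_mem_items d (by simpa using hqmem) hnd []
    simp [ht0q, this]

-- ===== VERDICT (by name: the statement is the Claim_ definition above) =====
theorem get_mgt_rules_for_timestamp_spec : Claim_equal_get_mgt_rules_for_timestamp := by
  intro k mgt_rules _ hpre
  unfold Spec_get_mgt_rules_for_timestamp
  exact pvMain k mgt_rules hpre
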